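-- pv_equiv track=rewrite | github.com/vlladislavii/Data_processing_kpi | lab/lab4/lab4_ECLAT.py | build_tid_list
-- ===== SOURCE A (Python) =====
-- def build_tid_list(transactions):
--     """
--     Повертає словник: товар -> множина індексів транзакцій (tid),
--     де цей товар зустрічається.
--     """
--     tid_list = {}
--     for tid, transaction in enumerate(transactions):
--         for item in transaction:
--             if item not in tid_list:
--                 tid_list[item] = set()
--             tid_list[item].add(tid)
--     return tid_list
-- ===== SOURCE B (Python) =====
-- def build_tid_list(transactions):
--     items = list(dict.fromkeys(item for t in transactions for item in t))
--     return {item: {tid for tid, t in enumerate(transactions) if item in t}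
--             for item in items}
-- ===== Notes on version B (the rewrite author's own statement) =====
-- stated objective: alternative
-- what changed: Inverts the loop nesting: first collects the distinct items in one pass, then builds the dict by a comprehension that scans the transaction list once per item, instead of A's single streaming pass that grows sets in a mutable dict.
import Mathlib
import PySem

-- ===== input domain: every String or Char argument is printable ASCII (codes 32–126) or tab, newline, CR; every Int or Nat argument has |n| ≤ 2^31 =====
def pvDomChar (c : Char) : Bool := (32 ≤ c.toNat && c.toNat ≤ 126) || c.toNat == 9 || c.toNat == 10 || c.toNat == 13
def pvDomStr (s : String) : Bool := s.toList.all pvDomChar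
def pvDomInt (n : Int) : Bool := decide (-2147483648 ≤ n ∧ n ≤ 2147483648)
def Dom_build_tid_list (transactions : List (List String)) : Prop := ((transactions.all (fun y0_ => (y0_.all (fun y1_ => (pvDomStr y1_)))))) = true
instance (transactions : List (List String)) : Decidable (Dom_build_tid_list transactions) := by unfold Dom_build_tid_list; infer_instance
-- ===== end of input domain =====

-- B inverts the loop nesting (distinct items first, then one scan of the transactions per item)
-- instead of A's single streaming pass over a mutable dict of sets: an alternative decomposition, not faster.

-- ===== PORT A =====
-- body of A's inner loop: 'if item not in tid_list: tid_list[item] = set()' then 'tid_list[item].add(tid)'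
def pvInnerA (tid : Int) (d : PySem.Dict String (List Int)) (item : String) : PySem.Dict String (List Int) :=
  let d := if d.contains item then d else d.insert item PySem.Set.empty
  d.modify item PySem.Set.empty (fun s => PySem.Set.add s tid)

def build_tid_list (transactions : List (List String)) : List (String × List Int) :=
  ((PySem.List.enumerate transactions 0).foldl
      (fun d p => p.2.foldl (pvInnerA p.1) d)
      PySem.Dict.empty).items

-- ===== PORT B =====
def build_tid_list_alt (transactions : List (List String)) : List (String × List Int) :=
  let items := PySem.List.dedup (transactions.flatMap (fun t => t))
  items.map (fun item =>
    (item, PySem.Set.ofList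
      (((PySem.List.enumerate transactions 0).filter (fun p => p.2.contains item)).map (fun p => p.1))))

-- ===== PRECONDITION & SPEC =====
def Spec_build_tid_list (transactions : List (List String)) (out : List (String × List Int)) : Prop := out = build_tid_list_alt transactions
instance (transactions : List (List String)) (out : List (String × List Int)) : Decidable (Spec_build_tid_list transactions out) := by unfold Spec_build_tid_list; infer_instance

-- ===== CLAIM (what is proved, stated in full; the proofs are below) =====
def Claim_equal_build_tid_list : Prop := ∀ (transactions : List (List String)), Dom_build_tid_list transactions → Spec_build_tid_list transactions (build_tid_list transactions)

-- ===== LEMMAS AND PROOFS =====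

-- tid set of an item: indices of the transactions containing it
def tidsOf (ts : List (List String)) (it : String) : List Int :=
  ((PySem.List.enumerate ts 0).filter (fun p => p.2.contains it)).map (fun p => p.1)

-- A's dict after processing all of ts and then the items s of a partially-read next transaction
def pvPart (ts : List (List String)) (s : List String) : List (String × List Int) :=
  (PySem.List.dedup (ts.flatMap (fun t => t) ++ s)).map
    (fun it => (it, tidsOf ts it ++ (if s.contains it then [(ts.length : Int)] else [])))

lemma ofList_self {α : Type} [BEq α] [LawfulBEq α] (l : List α) (h : l.Nodup) :
    PySem.Set.ofList l = l := by
  induction l using List.reverseRecOn with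
  | nil => rfl
  | append_singleton xs x ih =>
    rw [PySem.Set.ofList_eq_foldl, List.foldl_append, ← PySem.Set.ofList_eq_foldl]
    simp only [List.foldl_cons, List.foldl_nil]
    have hxs : xs.Nodup ∧ x ∉ xs := by
      constructor
      · exact (List.nodup_append.mp h).1
      · intro hx
        exact (List.nodup_append.mp h).2.2 x hx x (List.mem_singleton_self x) rfl
    have hx : x ∉ PySem.Set.ofList xs := by
      rw [PySem.Set.mem_ofList]; exact hxs.2
    rw [PySem.Set.add_of_not_mem hx, ih hxs.1]

lemma dedup_snoc {α : Type} [BEq α] [LawfulBEq α] (xs : List α) (x : α) :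
    PySem.List.dedup (xs ++ [x]) = if x ∈ xs then PySem.List.dedup xs else PySem.List.dedup xs ++ [x] := by
  rw [PySem.List.dedup_eq_ofList, PySem.List.dedup_eq_ofList, PySem.Set.ofList_eq_foldl,
    List.foldl_append, ← PySem.Set.ofList_eq_foldl]
  simp only [List.foldl_cons, List.foldl_nil]
  rw [PySem.Set.add_eq_ite]
  simp [PySem.Set.mem_ofList]

lemma tids_nodup (ts : List (List String)) (it : String) : (tidsOf ts it).Nodup := by
  have hp := PySem.List.pairwise_lt_enumerate ts 0
  have hf := hp.filter (fun p => p.2.contains it)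
  have hm := List.Pairwise.map (f := fun p : Int × List String => p.1)
    (S := fun a b : Int => a < b) (fun a b h => h) hf
  exact hm.imp (fun h => ne_of_lt h)

lemma tids_lt (ts : List (List String)) (it : String) :
    ∀ x ∈ tidsOf ts it, x < (ts.length : Int) := by
  intro x hx
  obtain ⟨p, hp, rfl⟩ := List.mem_map.mp hx
  have hpe := (List.mem_filter.mp hp).1
  obtain ⟨k, hk, rfl⟩ := (PySem.List.mem_enumerate_iff ts 0 p).mp hpe
  simp only [zero_add]
  exact_mod_cast hk

lemma tids_nil (ts : List (List String)) (it : String)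
    (h : it ∉ ts.flatMap (fun t => t)) : tidsOf ts it = [] := by
  unfold tidsOf
  rw [List.filter_eq_nil_iff.mpr, List.map_nil]
  intro p hp hc
  obtain ⟨k, hk, rfl⟩ := (PySem.List.mem_enumerate_iff ts 0 p).mp hp
  exact h (List.mem_flatMap.mpr ⟨ts[k], List.getElem_mem hk, by simpa using hc⟩)

lemma tids_snoc (ts : List (List String)) (t : List String) (it : String) :
    tidsOf (ts ++ [t]) it = tidsOf ts it ++ (if t.contains it then [(ts.length : Int)] else []) := by
  unfold tidsOf
  rw [PySem.List.enumerate_append, List.filter_append, List.map_append]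
  congr 1
  rw [PySem.List.enumerate_cons, PySem.List.enumerate_nil]
  by_cases hc : it ∈ t <;> simp [List.filter, hc]

lemma inner_step (ts : List (List String)) (s : List String) (item : String)
    (d : PySem.Dict String (List Int)) (hd : d.items = pvPart ts s) :
    (pvInnerA (ts.length : Int) d item).items = pvPart ts (s ++ [item]) := by
  have hmod : ∀ (dd : PySem.Dict String (List Int)) (k : String) (d0 : List Int) (f : List Int → List Int),
      dd.modify k d0 f = dd.insert k (f (dd.getD k d0)) := fun _ _ _ _ => rfl
  set K := ts.flatMap (fun t => t) ++ s with hK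
  set L := PySem.List.dedup K with hL
  set g : String → String × List Int :=
    fun it => (it, tidsOf ts it ++ (if s.contains it then [(ts.length : Int)] else [])) with hg
  have hdi : d.items = L.map g := hd
  have hnd : L.Nodup := PySem.List.nodup_dedup K
  have hkeys : d.keys = L := by
    simp only [PySem.Dict.keys, hdi, List.map_map]
    exact List.map_id L
  have hKassoc : ts.flatMap (fun t => t) ++ (s ++ [item]) = K ++ [item] := by
    rw [hK, List.append_assoc]
  by_cases hm : item ∈ L
  · -- item already a key
    have hmK : item ∈ K := (PySem.List.mem_dedup K item).mp hm
    have hc : d.contains item = true := by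
      rw [PySem.Dict.contains_eq_decide_mem_keys, hkeys]; exact decide_eq_true hm
    have hget : d.getD item PySem.Set.empty = (g item).2 := by
      refine PySem.Dict.getD_of_mem_items d ?_ (hkeys ▸ hnd) _
      rw [hdi]; exact List.mem_map_of_mem hm
    show ((if d.contains item then d else d.insert item PySem.Set.empty).modify item
        PySem.Set.empty (fun w => PySem.Set.add w (ts.length : Int))).items = _
    rw [hc]
    simp only [if_true]
    rw [hmod, hget, PySem.Dict.items_insert_of_contains d _ hc, hdi, List.map_map]
    unfold pvPart
    rw [hKassoc, dedup_snoc, if_pos hmK, ← hL]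
    refine List.map_congr_left fun it hit => ?_
    simp only [hg, Function.comp_apply]
    by_cases he : it = item
    · subst he
      simp only [beq_self_eq_true, if_true]
      have hcT : (s ++ [it]).contains it = true := by simp
      simp only [hcT, if_true]
      rw [PySem.Set.add_eq_ite]
      by_cases hs : it ∈ s
      · have hst : s.contains it = true := by simpa using hs
        simp only [hst, if_true]
        rw [if_pos (by simp)]
      · have hsf : s.contains it = false := by simpa using hs
        simp only [hsf, Bool.false_eq_true, if_false, List.append_nil]
        rw [if_neg fun hmem => absurd (tids_lt ts it _ hmem) (lt_irrefl _)]
    · have hb : (it == item) = false := beq_eq_false_iff_ne.mpr he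
      simp only [hb, Bool.false_eq_true, if_false]
      have hca : (s ++ [item]).contains it = s.contains it := by simp [he]
      rw [hca]
  · -- new key
    have hmK : item ∉ K := fun h => hm ((PySem.List.mem_dedup K item).mpr h)
    have hc : d.contains item = false := by
      rw [PySem.Dict.contains_eq_decide_mem_keys, hkeys]; exact decide_eq_false hm
    show ((if d.contains item then d else d.insert item PySem.Set.empty).modify item
        PySem.Set.empty (fun w => PySem.Set.add w (ts.length : Int))).items = _
    rw [hc]
    simp only [Bool.false_eq_true, if_false]
    set d1 := d.insert item PySem.Set.empty with hd1
    have hd1i : d1.items = L.map g ++ [(item, [])] := by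
      rw [hd1, PySem.Dict.items_insert_of_not_contains d _ hc, hdi]; rfl
    have hd1k : d1.keys = L ++ [item] := by
      simp only [PySem.Dict.keys, hd1i, List.map_append, List.map_map]
      congr 1
      exact List.map_id L
    have hd1nd : d1.keys.Nodup := by
      rw [hd1k, List.nodup_append]
      refine ⟨hnd, List.nodup_singleton item, fun a ha b hb => ?_⟩
      have hbi : b = item := by simpa using hb
      exact fun hab => hm (hbi ▸ hab ▸ ha)
    have hc1 : d1.contains item = true := by
      rw [PySem.Dict.contains_eq_decide_mem_keys, hd1k]
      exact decide_eq_true (List.mem_append.mpr (Or.inr (List.mem_singleton_self item)))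
    have hget1 : d1.getD item PySem.Set.empty = [] := by
      refine PySem.Dict.getD_of_mem_items d1 ?_ hd1nd _
      rw [hd1i]; exact List.mem_append.mpr (Or.inr (List.mem_singleton_self (item, [])))
    rw [hmod, hget1, PySem.Dict.items_insert_of_contains d1 _ hc1, hd1i, List.map_append,
      List.map_map]
    unfold pvPart
    rw [hKassoc, dedup_snoc, if_neg hmK, ← hL, List.map_append]
    congr 1
    · refine List.map_congr_left fun it hit => ?_
      have he : it ≠ item := fun h => hm (h ▸ hit)
      simp only [hg, Function.comp_apply]
      have hb : (it == item) = false := beq_eq_false_iff_ne.mpr he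
      simp only [hb, Bool.false_eq_true, if_false]
      have hca : (s ++ [item]).contains it = s.contains it := by simp [he]
      rw [hca]
    · simp only [List.map_cons, List.map_nil, beq_self_eq_true, if_true]
      have hitem : tidsOf ts item = [] :=
        tids_nil ts item (fun h => hmK (List.mem_append.mpr (Or.inl h)))
      have hcT : (s ++ [item]).contains item = true := by simp
      rw [hitem, hcT]
      rfl

lemma inner_fold (ts : List (List String)) (u : List String) :
    ∀ (s : List String) (d : PySem.Dict String (List Int)), d.items = pvPart ts s →
      (u.foldl (pvInnerA (ts.length : Int)) d).items = pvPart ts (s ++ u) := by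
  induction u with
  | nil => intro s d hd; simpa using hd
  | cons x u ih =>
    intro s d hd
    rw [List.foldl_cons]
    have h1 := inner_step ts s x d hd
    have h2 := ih (s ++ [x]) _ h1
    rwa [List.append_assoc, List.singleton_append] at h2

lemma part_shift (ts : List (List String)) (t : List String) :
    pvPart ts t = pvPart (ts ++ [t]) [] := by
  unfold pvPart
  rw [List.flatMap_append]
  simp only [List.flatMap_cons, List.flatMap_nil, List.append_nil, List.contains_nil,
    Bool.false_eq_true, if_false]
  refine List.map_congr_left fun it _ => ?_
  rw [tids_snoc]

lemma fold_all (rest : List (List String)) :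
    ∀ (pre : List (List String)) (d : PySem.Dict String (List Int)), d.items = pvPart pre [] →
      ((PySem.List.enumerate rest (pre.length : Int)).foldl
        (fun d p => p.2.foldl (pvInnerA p.1) d) d).items = pvPart (pre ++ rest) [] := by
  induction rest with
  | nil => intro pre d hd; simpa using hd
  | cons t rest ih =>
    intro pre d hd
    rw [PySem.List.enumerate_cons, List.foldl_cons]
    have h1 : (t.foldl (pvInnerA (pre.length : Int)) d).items = pvPart (pre ++ [t]) [] := by
      rw [← part_shift]
      simpa using inner_fold pre t [] d (by simpa using hd)
    have h2 := ih (pre ++ [t]) _ h1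
    have hlen : (((pre ++ [t]).length : Int)) = (pre.length : Int) + 1 := by
      simp [List.length_append]
    rw [hlen] at h2
    rw [List.append_assoc, List.singleton_append] at h2
    exact h2

-- ===== VERDICT (by name: the statement is the Claim_ definition above) =====
theorem build_tid_list_spec : Claim_equal_build_tid_list := by
  intro ts _
  unfold Spec_build_tid_list build_tid_list build_tid_list_alt
  have h := fold_all ts [] PySem.Dict.empty (by rfl)
  simp only [List.length_nil, Int.natCast_zero] at h
  rw [h]
  unfold pvPart
  simp only [List.append_nil, List.contains_nil, Bool.false_eq_true, if_false]
  refine List.map_congr_left fun it _ => ?_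
  show (it, tidsOf ts it) = (it, PySem.Set.ofList (tidsOf ts it))
  rw [ofList_self _ (tids_nodup ts it)]
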